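-- pv_equiv track=rewrite | github.com/shhuan1989/algorithms | py/codeforces/883F.py | transform
-- ===== SOURCE A (Python) =====
-- def transform(s):
--     t = []
--     for c in s:
--         if c == 'u':
--             t.append('oo')
--         elif c == "h":
--             while t and t[-1] == "k":
--                 t.pop()
--             t.append("h")
--         else:
--             t.append(c)
--
--     return "".join(t)
-- ===== SOURCE B (Python) =====
-- def transform(s):
--     out = []
--     pending = 0  # number of consecutive 'k's not yet emitted
--     for c in s:
--         if c == 'k':
--             pending += 1
--         elif c == 'h':
--             pending = 0          # the run of k's is swallowed by the h
--             out.append('h')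
--         else:
--             out.append('k' * pending)   # any other char protects the k's
--             pending = 0
--             out.append('oo' if c == 'u' else c)
--     out.append('k' * pending)
--     return ''.join(out)
-- ===== Notes on version B (the rewrite author's own statement) =====
-- stated objective: alternative
-- what changed: Replaces A's stack of emitted pieces with backward pops on 'h' by a single forward pass keeping only a counter of pending consecutive 'k's, which is dropped on 'h' and flushed on any other character.
import Mathlib
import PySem

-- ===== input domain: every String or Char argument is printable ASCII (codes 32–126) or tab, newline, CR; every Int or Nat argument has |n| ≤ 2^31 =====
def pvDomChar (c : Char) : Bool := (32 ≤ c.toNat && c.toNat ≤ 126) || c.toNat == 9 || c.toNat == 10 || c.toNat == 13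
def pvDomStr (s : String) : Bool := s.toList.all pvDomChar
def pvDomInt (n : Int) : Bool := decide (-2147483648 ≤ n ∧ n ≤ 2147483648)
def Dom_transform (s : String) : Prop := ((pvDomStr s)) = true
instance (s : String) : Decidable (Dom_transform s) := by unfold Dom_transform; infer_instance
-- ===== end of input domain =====

-- B replaces A's stack (with pops of trailing "k" entries on 'h') by a forward pass
-- that only counts pending consecutive 'k's; same return value, similar cost.

-- ===== PORT A =====
-- 'while t and t[-1] == "k": t.pop()'  (stack kept head-first: head = top of Python's list)
def popKs : List String → List String
  | [] => []
  | x :: rest => if x = "k" then popKs rest else x :: rest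

def stepA (t : List String) (c : Char) : List String :=
  if c = 'u' then "oo" :: t
  else if c = 'h' then "h" :: popKs t
  else c.toString :: t

def transform (s : String) : String :=
  let t := s.toList.foldl stepA []
  PySem.Str.join "" t.reverse

-- ===== PORT B =====
-- state = (out pieces head-first, pending count of unflushed 'k's)
def stepB (st : List String × Nat) (c : Char) : List String × Nat :=
  if c = 'k' then (st.1, st.2 + 1)
  else if c = 'h' then ("h" :: st.1, 0)
  else ((if c = 'u' then "oo" else c.toString) :: String.ofList (List.replicate st.2 'k') :: st.1, 0)

def transform_alt (s : String) : String :=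
  let st := s.toList.foldl stepB ([], 0)
  PySem.Str.join "" ((String.ofList (List.replicate st.2 'k') :: st.1).reverse)

-- ===== PRECONDITION & SPEC =====
def Spec_transform (s : String) (out : String) : Prop := out = transform_alt s
instance (s : String) (out : String) : Decidable (Spec_transform s out) := by unfold Spec_transform; infer_instance

-- ===== CLAIM (what is proved, stated in full; the proofs are below) =====
def Claim_equal_transform : Prop := ∀ (s : String), Dom_transform s → Spec_transform s (transform s)

-- ===== LEMMAS AND PROOFS =====

-- the character content of a list of pieces, in order
def F (l : List String) : List Char := (l.map String.toList).flatten

lemma F_append (a b : List String) : F (a ++ b) = F a ++ F b := by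
  simp [F]

lemma F_replicate (p : Nat) : F (List.replicate p "k") = List.replicate p 'k' := by
  induction p with
  | zero => simp [F]
  | succ n ih =>
      simp only [List.replicate_succ, F, List.map_cons, List.flatten_cons] at *
      simp [ih]

lemma chars_join_nil (L : List (List Char)) : PySem.Chars.join [] L = L.flatten := by
  induction L with
  | nil => simp [PySem.Chars.join_nil]
  | cons x rest ih =>
      cases rest with
      | nil => simp [PySem.Chars.join_singleton]
      | cons y r => rw [PySem.Chars.join_cons_cons]; simp_all

lemma join_eq_F (l : List String) : (PySem.Str.join "" l).toList = F l := by
  rw [PySem.Str.toList_join]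
  have h : ("" : String).toList = [] := rfl
  rw [h, chars_join_nil]
  simp [F]

lemma toString_ne_k {c : Char} (h : c ≠ 'k') : c.toString ≠ "k" := by
  intro he
  apply h
  have : c.toString.toList = ("k" : String).toList := by rw [he]
  simpa using this

lemma popKs_of_head_ne (R : List String) (h : ∀ x ∈ R.head?, x ≠ "k") :
    popKs R = R := by
  cases R with
  | nil => rfl
  | cons x r =>
      have : x ≠ "k" := h x (by simp)
      simp [popKs, this]

lemma popKs_replicate (p : Nat) (R : List String) (h : ∀ x ∈ R.head?, x ≠ "k") :
    popKs (List.replicate p "k" ++ R) = R := by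
  induction p with
  | zero => simpa using popKs_of_head_ne R h
  | succ n ih => simpa [List.replicate_succ, popKs] using ih

lemma loop_inv (cs : List Char) :
    ∀ (out : List String) (p : Nat) (R : List String),
      (∀ x ∈ R.head?, x ≠ "k") →
      F R.reverse = F out.reverse →
      ∃ R',
        cs.foldl stepA (List.replicate p "k" ++ R)
          = List.replicate (cs.foldl stepB (out, p)).2 "k" ++ R' ∧
        (∀ x ∈ R'.head?, x ≠ "k") ∧
        F R'.reverse = F (cs.foldl stepB (out, p)).1.reverse := by
  induction cs with
  | nil =>
      intro out p R hhd hF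
      exact ⟨R, rfl, hhd, hF⟩
  | cons c cs ih =>
      intro out p R hhd hF
      simp only [List.foldl_cons]
      by_cases hu : c = 'u'
      · -- push "oo", flush the pending k's
        have hA : stepA (List.replicate p "k" ++ R) c
            = List.replicate 0 "k" ++ ("oo" :: (List.replicate p "k" ++ R)) := by
          simp [stepA, hu]
        have hB : stepB (out, p) c
            = ("oo" :: String.ofList (List.replicate p 'k') :: out, 0) := by
          simp [stepB, hu]
        rw [hA, hB]
        apply ih
        · intro x hx; simp at hx; subst hx; decide
        · have hr : (List.map String.toList (List.replicate p ("k" : String))).flatten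
              = List.replicate p 'k' := by simpa [F] using F_replicate p
          simp [F] at hF
          simp [F, hr, hF, String.toList_ofList]
      · by_cases hh : c = 'h'
        · -- pop the k's, push "h"
          have hA : stepA (List.replicate p "k" ++ R) c
              = List.replicate 0 "k" ++ ("h" :: R) := by
            simp [stepA, hu, hh, popKs_replicate p R hhd]
          have hB : stepB (out, p) c = ("h" :: out, 0) := by
            simp [stepB, hu, hh]
          rw [hA, hB]
          apply ih
          · intro x hx; simp at hx; subst hx; decide
          · simp only [List.reverse_cons]
            rw [F_append, F_append, hF]
        · by_cases hk : c = 'k'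
          · -- one more pending k
            have hA : stepA (List.replicate p "k" ++ R) c
                = List.replicate (p + 1) "k" ++ R := by
              simp [stepA, hu, hh, hk, List.replicate_succ]
              decide
            have hB : stepB (out, p) c = (out, p + 1) := by
              simp [stepB, hk]
            rw [hA, hB]
            exact ih out (p + 1) R hhd hF
          · -- ordinary character: flush the pending k's, push the char
            have hA : stepA (List.replicate p "k" ++ R) c
                = List.replicate 0 "k" ++ (c.toString :: (List.replicate p "k" ++ R)) := by
              simp [stepA, hu, hh]
            have hB : stepB (out, p) c
                = (c.toString :: String.ofList (List.replicate p 'k') :: out, 0) := by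
              simp [stepB, hu, hh, hk]
            rw [hA, hB]
            apply ih
            · intro x hx; simp at hx; subst hx; exact toString_ne_k hk
            · have hr : (List.map String.toList (List.replicate p ("k" : String))).flatten
                  = List.replicate p 'k' := by simpa [F] using F_replicate p
              simp [F] at hF
              simp [F, hr, hF, String.toList_ofList]

-- ===== VERDICT (by name: the statement is the Claim_ definition above) =====
theorem transform_spec : Claim_equal_transform := by
  intro s _
  unfold Spec_transform transform transform_alt
  obtain ⟨R', hA, _, hF⟩ :=
    loop_inv s.toList [] 0 [] (by intro x hx; simp at hx) rfl
  simp only at hA hF ⊢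
  apply String.ext  -- equal character lists give equal strings
  rw [join_eq_F, join_eq_F]
  rw [show s.toList.foldl stepA [] = s.toList.foldl stepA (List.replicate 0 "k" ++ []) from rfl, hA]
  have hr : (List.map String.toList (List.replicate (s.toList.foldl stepB ([], 0) : List String × Nat).2 ("k" : String))).flatten
      = List.replicate (s.toList.foldl stepB ([], 0) : List String × Nat).2 'k' := by
    simpa [F] using F_replicate (s.toList.foldl stepB ([], 0) : List String × Nat).2
  simp [F] at hF
  simp [F, hr, hF, String.toList_ofList]
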